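-- pv_equiv track=rewrite | github.com/kristaps0d/cs-course | extras/turtle-draw/binary_sort.py | to_numbers
-- ===== SOURCE A (Python) =====
-- import string, time
--
-- def to_numbers(text, index=0, value=0):
--     dict = string.ascii_letters
--
--     # check if all letters have been accounted for
--     if len(text) < index + 1:
--         return value
--
--     # cycle trough every letter from dict
--     for n, i in enumerate(dict):
--         if i == text[index]:
--             return to_numbers(
--                 text,
--                 index + 1,
--                 value + n + 1
--             )
-- ===== SOURCE B (Python) =====
-- import string
--
-- _POS = {ch: n + 1 for n, ch in enumerate(string.ascii_letters)}
--
-- def to_numbers(text, index=0, value=0):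
--     total = value
--     for ch in text[index:]:
--         pos = _POS.get(ch)
--         if pos is None:
--             return None
--         total += pos
--     return total
-- ===== Notes on version B (the rewrite author's own statement) =====
-- stated objective: idiomatic
-- what changed: Replaces A's tail recursion (one call per character, each doing a 52-character enumerate scan) by a flat iterative loop over the slice text[index:] accumulating a total, with the letter positions precomputed once in a module-level dict.
-- intended difference: On in-range negative index (-len(text) <= index < 0) whose wrapped suffix text[index:] consists only of letters, A wraps around and then re-scans the whole string from 0, returning the doubled-up sum (or None if the string contains a non-letter), while B returns the sum of text[index:] alone, the intended value for that slice. — e.g. on to_numbers("ab", -1, 0): A returns some 5, B returns some 2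
import Mathlib
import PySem

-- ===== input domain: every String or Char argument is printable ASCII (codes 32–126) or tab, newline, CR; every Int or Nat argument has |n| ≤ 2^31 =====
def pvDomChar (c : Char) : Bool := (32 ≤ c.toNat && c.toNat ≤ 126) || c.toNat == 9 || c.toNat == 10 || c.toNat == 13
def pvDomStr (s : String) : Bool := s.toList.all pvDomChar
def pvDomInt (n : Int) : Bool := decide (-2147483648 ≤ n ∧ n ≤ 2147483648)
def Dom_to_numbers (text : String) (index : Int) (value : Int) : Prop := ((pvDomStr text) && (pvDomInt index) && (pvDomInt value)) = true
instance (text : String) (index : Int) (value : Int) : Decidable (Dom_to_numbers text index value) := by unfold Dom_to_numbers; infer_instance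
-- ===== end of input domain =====

-- B replaces A's accumulator recursion + 52-char scan per step with an iterative pass over the slice
-- text[index:] and a precomputed letter→position dict (objective: idiomatic); on in-range negative index
-- A wraps around and re-scans the whole string, which B intentionally does not reproduce (see D_to_numbers).


-- ===== PORT A =====
-- string.ascii_letters
def pvLetters : List Char := "abcdefghijklmnopqrstuvwxyzABCDEFGHIJKLMNOPQRSTUVWXYZ".toList

-- A's 'for n, i in enumerate(dict): if i == text[index]: return …' — the scan for the first match,
-- returning its enumerate index n (none = the loop falls through, so A returns None).
def pvFindPos (n : Int) (ls : List Char) (c : Char) : Option Int :=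
  match ls with
  | [] => none
  | i :: rest => if i == c then some n else pvFindPos (n + 1) rest c

def to_numbers (text : String) (index : Int) (value : Int) : Option Int :=
  if PySem.Str.len text < index + 1 then some value
  else
    match PySem.Str.pyGet? text index with
    | none => none   -- IndexError (index < -len(text)); excluded by Pre_to_numbers
    | some c =>
      match pvFindPos 0 pvLetters c with
      | none => none   -- the for-loop falls through: Python returns None
      | some n => to_numbers text (index + 1) (value + n + 1)
termination_by (PySem.Str.len text - index).toNat
decreasing_by
  simp only [PySem.Str.len_eq, not_lt] at *
  omega

-- ===== PORT B =====
-- _POS = {ch: n + 1 for n, ch in enumerate(string.ascii_letters)}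
def pvBuildPos (d : PySem.Dict Char Int) (n : Int) (ls : List Char) : PySem.Dict Char Int :=
  match ls with
  | [] => d
  | c :: rest => pvBuildPos (d.insert c (n + 1)) (n + 1) rest

def pvPosDict : PySem.Dict Char Int := pvBuildPos PySem.Dict.empty 0 pvLetters

-- the 'for ch in text[index:]' loop with accumulator total (pos = _POS.get(ch); None → return None)
def pvSumLoop (d : PySem.Dict Char Int) (total : Int) (cs : List Char) : Option Int :=
  match cs with
  | [] => some total
  | c :: rest =>
    match PySem.Dict.get? d c with
    | none => none
    | some p => pvSumLoop d (total + p) rest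

def to_numbers_alt (text : String) (index : Int) (value : Int) : Option Int :=
  pvSumLoop pvPosDict value (PySem.List.slice text.toList (some index) none)

-- ===== PRECONDITION & SPEC =====
-- Pre_ excludes exactly index < -len(text), where A raises IndexError on text[index].
def Pre_to_numbers (text : String) (index : Int) (value : Int) : Prop :=
  -(text.toList.length : Int) ≤ index

instance (text : String) (index : Int) (value : Int) : Decidable (Pre_to_numbers text index value) := by
  unfold Pre_to_numbers; infer_instance

def pvWitness_to_numbers : String × Int × Int := ("Hello", 0, 0)

-- On -len(text) ≤ index < 0 with the wrapped-around suffix text[index:] all letters (so A survives it),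
-- A's negative index wraps and the recursion then re-scans the whole string from 0, returning the
-- doubled-up sum (or None if text has a non-letter); B returns the sum of text[index:] alone, the
-- intended value for that slice.
def D_to_numbers (text : String) (index : Int) (value : Int) : Prop :=
  index < 0 ∧ -(text.toList.length : Int) ≤ index ∧
    (text.toList.drop (text.toList.length - (-index).toNat)).all pvLetters.contains = true

instance (text : String) (index : Int) (value : Int) : Decidable (D_to_numbers text index value) := by
  unfold D_to_numbers; infer_instance

def Spec_to_numbers (text : String) (index : Int) (value : Int) (out : Option Int) : Prop :=
  ¬ D_to_numbers text index value → out = to_numbers_alt text index value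

instance (text : String) (index : Int) (value : Int) (out : Option Int) : Decidable (Spec_to_numbers text index value out) := by
  unfold Spec_to_numbers; infer_instance

def pvDiffWitness_to_numbers : String × Int × Int := ("ab", -1, 0)
def pvDiffWitnessOut_to_numbers : (Option Int) × (Option Int) := (some 5, some 2)

-- ===== CLAIM (what is proved, stated in full; the proofs are below) =====
def Claim_unchanged_to_numbers : Prop := ∀ (text : String) (index : Int) (value : Int), Dom_to_numbers text index value → Pre_to_numbers text index value → Spec_to_numbers text index value (to_numbers text index value)
def Claim_changed_to_numbers : Prop := Dom_to_numbers (pvDiffWitness_to_numbers.1) (pvDiffWitness_to_numbers.2.1) (pvDiffWitness_to_numbers.2.2) ∧ Pre_to_numbers (pvDiffWitness_to_numbers.1) (pvDiffWitness_to_numbers.2.1) (pvDiffWitness_to_numbers.2.2) ∧ D_to_numbers (pvDiffWitness_to_numbers.1) (pvDiffWitness_to_numbers.2.1) (pvDiffWitness_to_numbers.2.2) ∧ to_numbers (pvDiffWitness_to_numbers.1) (pvDiffWitness_to_numbers.2.1) (pvDiffWitness_to_numbers.2.2) = pvDiffWitnessOut_to_numbers.1 ∧ to_numbers_alt (pvDiffWitness_to_numbers.1)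 (pvDiffWitness_to_numbers.2.1) (pvDiffWitness_to_numbers.2.2) = pvDiffWitnessOut_to_numbers.2 ∧ pvDiffWitnessOut_to_numbers.1 ≠ pvDiffWitnessOut_to_numbers.2
def Claim_exact_to_numbers : Prop := ∀ (text : String) (index : Int) (value : Int), Dom_to_numbers text index value → Pre_to_numbers text index value → D_to_numbers text index value → to_numbers text index value ≠ to_numbers_alt text index value

-- ===== LEMMAS AND PROOFS =====

lemma pvFindPos_none_of_not_mem (ls : List Char) (c : Char) (h : c ∉ ls) :
    ∀ n, pvFindPos n ls c = none := by
  induction ls with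
  | nil => intro n; rfl
  | cons a rest ih =>
    intro n
    simp only [List.mem_cons, not_or] at h
    simp only [pvFindPos, beq_iff_eq]
    rw [if_neg (by exact fun hac => h.1 hac.symm)]
    exact ih h.2 (n + 1)

lemma pvFindPos_isSome_of_mem (ls : List Char) (c : Char) (h : c ∈ ls) :
    ∀ n, (pvFindPos n ls c).isSome := by
  induction ls with
  | nil => exact absurd h (List.not_mem_nil)
  | cons a rest ih =>
    intro n
    simp only [pvFindPos, beq_iff_eq]
    by_cases hac : a = c
    · rw [if_pos hac]; rfl
    · rw [if_neg hac]
      have h' : c ∈ rest := by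
        rcases List.mem_cons.mp h with h1 | h1
        · exact absurd h1.symm hac
        · exact h1
      exact ih h' (n + 1)

lemma pvFindPos_le_of_some (ls : List Char) (c : Char) :
    ∀ n m, pvFindPos n ls c = some m → n ≤ m := by
  induction ls with
  | nil => intro n m h; exact absurd h (by simp [pvFindPos])
  | cons a rest ih =>
    intro n m h
    simp only [pvFindPos] at h
    by_cases hac : (a == c) = true
    · rw [if_pos hac] at h
      injection h with h'
      omega
    · rw [if_neg hac] at h
      have := ih (n + 1) m h
      omega

lemma pvBuildPos_get? (ls : List Char) (hnd : ls.Nodup) :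
    ∀ (d : PySem.Dict Char Int) (n : Int) (c : Char),
      PySem.Dict.get? (pvBuildPos d n ls) c =
        match pvFindPos n ls c with
        | some m => some (m + 1)
        | none => PySem.Dict.get? d c := by
  induction ls with
  | nil => intro d n c; rfl
  | cons a rest ih =>
    intro d n c
    rcases List.nodup_cons.mp hnd with ⟨ha, hrest⟩
    simp only [pvBuildPos, pvFindPos, beq_iff_eq]
    by_cases hac : a = c
    · rw [if_pos hac]
      rw [ih hrest]
      rw [pvFindPos_none_of_not_mem rest c (by rw [← hac]; exact ha) (n + 1)]
      subst hac
      exact PySem.Dict.get?_insert_self d a (n + 1)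
    · rw [if_neg hac]
      rw [ih hrest]
      cases hf : pvFindPos (n + 1) rest c with
      | some m => rfl
      | none => exact PySem.Dict.get?_insert_of_ne d (n + 1) (fun h => hac h.symm)

lemma pvLetters_nodup : pvLetters.Nodup := by decide

lemma pvPosDict_get? (c : Char) :
    PySem.Dict.get? pvPosDict c = (pvFindPos 0 pvLetters c).map (· + 1) := by
  rw [pvPosDict, pvBuildPos_get? pvLetters pvLetters_nodup]
  cases hf : pvFindPos 0 pvLetters c with
  | some m => rfl
  | none => rfl

lemma pvSumLoop_cons (d : PySem.Dict Char Int) (t : Int) (c : Char) (rest : List Char) :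
    pvSumLoop d t (c :: rest) =
      match PySem.Dict.get? d c with
      | none => none
      | some p => pvSumLoop d (t + p) rest := rfl

lemma to_numbers_base (text : String) (index value : Int)
    (h : PySem.Str.len text < index + 1) : to_numbers text index value = some value := by
  rw [to_numbers.eq_def, if_pos h]

lemma to_numbers_none (text : String) (index value : Int) (c : Char)
    (h1 : ¬ PySem.Str.len text < index + 1) (h2 : PySem.Str.pyGet? text index = some c)
    (h3 : pvFindPos 0 pvLetters c = none) : to_numbers text index value = none := by
  rw [to_numbers.eq_def, if_neg h1, h2]
  show (match pvFindPos 0 pvLetters c with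
    | none => none
    | some n => to_numbers text (index + 1) (value + n + 1)) = none
  rw [h3]

lemma to_numbers_step (text : String) (index value : Int) (c : Char) (n : Int)
    (h1 : ¬ PySem.Str.len text < index + 1) (h2 : PySem.Str.pyGet? text index = some c)
    (h3 : pvFindPos 0 pvLetters c = some n) :
    to_numbers text index value = to_numbers text (index + 1) (value + n + 1) := by
  rw [to_numbers.eq_def, if_neg h1, h2]
  show (match pvFindPos 0 pvLetters c with
    | none => none
    | some m => to_numbers text (index + 1) (value + m + 1)) = to_numbers text (index + 1) (value + n + 1)
  rw [h3]

lemma str_pyGet?_eq (text : String) (i : Int) :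
    PySem.Str.pyGet? text i = PySem.List.pyGet? text.toList i := rfl

-- A on a nonnegative index is exactly B's loop over the dropped prefix.
lemma to_numbers_nonneg_eq (text : String) :
    ∀ (m : Nat) (index value : Int), 0 ≤ index → m = text.toList.length - index.toNat →
      to_numbers text index value = pvSumLoop pvPosDict value (text.toList.drop index.toNat) := by
  intro m
  induction m with
  | zero =>
    intro index value h0 hm
    rw [to_numbers_base _ _ _ (by rw [PySem.Str.len_eq]; omega)]
    rw [List.drop_of_length_le (by omega)]
    rfl
  | succ k ih =>
    intro index value h0 hm
    by_cases hlt : PySem.Str.len text < index + 1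
    · rw [to_numbers_base _ _ _ hlt]
      rw [PySem.Str.len_eq] at hlt
      rw [List.drop_of_length_le (by omega)]
      rfl
    · have hlt' := hlt
      rw [PySem.Str.len_eq, not_lt] at hlt'
      have hidx : index.toNat < text.toList.length := by omega
      have h2 : PySem.Str.pyGet? text index = some (text.toList[index.toNat]) := by
        rw [str_pyGet?_eq, PySem.List.pyGet?_of_nonneg _ h0, List.getElem?_eq_getElem hidx]
      rw [List.drop_eq_getElem_cons hidx, pvSumLoop_cons, pvPosDict_get?]
      cases hf : pvFindPos 0 pvLetters (text.toList[index.toNat]) with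
      | none => rw [to_numbers_none _ _ _ _ hlt h2 hf]; rfl
      | some n =>
        rw [to_numbers_step _ _ _ _ _ hlt h2 hf]
        simp only [Option.map_some]
        have h1 : (index + 1).toNat = index.toNat + 1 := by omega
        have hrec := ih (index + 1) (value + n + 1) (by omega) (by omega)
        rw [hrec, h1, add_assoc]

lemma pvSumLoop_none_of_nonletter (cs : List Char) :
    ∀ value, (∃ c ∈ cs, c ∉ pvLetters) → pvSumLoop pvPosDict value cs = none := by
  induction cs with
  | nil => intro value h; rcases h with ⟨c, hc, _⟩; exact absurd hc (List.not_mem_nil)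
  | cons a rest ih =>
    intro value h
    rw [pvSumLoop_cons, pvPosDict_get?]
    by_cases ha : a ∈ pvLetters
    · have hs := pvFindPos_isSome_of_mem pvLetters a ha 0
      cases hf : pvFindPos 0 pvLetters a with
      | none => rw [hf] at hs; exact absurd hs (by simp)
      | some n =>
        simp only [Option.map_some]
        apply ih
        rcases h with ⟨c, hc, hcl⟩
        rcases List.mem_cons.mp hc with rfl | hcr
        · exact absurd ha hcl
        · exact ⟨c, hcr, hcl⟩
    · rw [pvFindPos_none_of_not_mem pvLetters a ha 0]
      rfl

lemma pvSumLoop_some_bound (cs : List Char) :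
    ∀ value s, pvSumLoop pvPosDict value cs = some s → value + cs.length ≤ s := by
  induction cs with
  | nil =>
    intro value s h
    simp only [pvSumLoop, Option.some_inj] at h
    simp [← h]
  | cons a rest ih =>
    intro value s h
    rw [pvSumLoop_cons, pvPosDict_get?] at h
    cases hf : pvFindPos 0 pvLetters a with
    | none => rw [hf] at h; exact absurd h (by simp)
    | some n =>
      rw [hf] at h
      simp only [Option.map_some] at h
      have hn := pvFindPos_le_of_some pvLetters a 0 n hf
      have := ih (value + (n + 1)) s h
      simp only [List.length_cons] at *
      push_cast at *
      omega

-- A launched at an in-range negative index -k: if the wrapped suffix contains a non-letter, A returns None.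
lemma to_numbers_neg_none (text : String) :
    ∀ (k : Nat) (value : Int), 1 ≤ k → k ≤ text.toList.length →
      (∃ c ∈ text.toList.drop (text.toList.length - k), c ∉ pvLetters) →
      to_numbers text (-(k : Int)) value = none := by
  intro k
  induction k with
  | zero => intro value h1 _ _; omega
  | succ j ih =>
    intro value _ hk hex
    have hL : text.toList.length - (j + 1) < text.toList.length := by omega
    have h2 : PySem.Str.pyGet? text (-(↑(j + 1) : Int)) =
        some (text.toList[text.toList.length - (j + 1)]) := by
      rw [str_pyGet?_eq, PySem.List.pyGet?_neg_natCast text.toList (j + 1) (by omega) hk,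
        List.getElem?_eq_getElem hL]
    have h1 : ¬ PySem.Str.len text < -(↑(j + 1) : Int) + 1 := by
      rw [PySem.Str.len_eq]; omega
    have hdrop := List.drop_eq_getElem_cons hL
    by_cases hmem : text.toList[text.toList.length - (j + 1)] ∈ pvLetters
    · -- head is a letter: the non-letter is in the tail; step and recurse
      rcases hex with ⟨c, hc, hcl⟩
      rw [hdrop] at hc
      rcases List.mem_cons.mp hc with rfl | hcr
      · exact absurd hmem hcl
      · have hj1 : 1 ≤ j := by
          by_contra hj0
          have hj : j = 0 := by omega
          subst hj
          rw [List.drop_of_length_le (by omega)] at hcr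
          exact absurd hcr (List.not_mem_nil)
        have hs := pvFindPos_isSome_of_mem pvLetters _ hmem 0
        cases hf : pvFindPos 0 pvLetters (text.toList[text.toList.length - (j + 1)]) with
        | none => rw [hf] at hs; exact absurd hs (by simp)
        | some n =>
          rw [to_numbers_step _ _ _ _ _ h1 h2 hf]
          have hcast : -(↑(j + 1) : Int) + 1 = -(↑j : Int) := by push_cast; ring
          rw [hcast]
          apply ih _ hj1 (by omega)
          refine ⟨c, ?_, hcl⟩
          have heq : text.toList.length - (j + 1) + 1 = text.toList.length - j := by omega
          rw [← heq]
          exact hcr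
    · have hf := pvFindPos_none_of_not_mem pvLetters _ hmem 0
      exact to_numbers_none _ _ _ _ h1 h2 hf

-- A launched at an in-range negative index -k with the wrapped suffix all letters: A sums the suffix
-- and then restarts at index 0; B's loop over the suffix returns exactly that partial sum.
lemma to_numbers_neg_allLetters (text : String) :
    ∀ (k : Nat) (value : Int), 1 ≤ k → k ≤ text.toList.length →
      (∀ c ∈ text.toList.drop (text.toList.length - k), c ∈ pvLetters) →
      ∃ v', pvSumLoop pvPosDict value (text.toList.drop (text.toList.length - k)) = some v' ∧
        to_numbers text (-(k : Int)) value = to_numbers text 0 v' := by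
  intro k
  induction k with
  | zero => intro value h1 _ _; omega
  | succ j ih =>
    intro value _ hk hall
    have hL : text.toList.length - (j + 1) < text.toList.length := by omega
    have h2 : PySem.Str.pyGet? text (-(↑(j + 1) : Int)) =
        some (text.toList[text.toList.length - (j + 1)]) := by
      rw [str_pyGet?_eq, PySem.List.pyGet?_neg_natCast text.toList (j + 1) (by omega) hk,
        List.getElem?_eq_getElem hL]
    have h1 : ¬ PySem.Str.len text < -(↑(j + 1) : Int) + 1 := by
      rw [PySem.Str.len_eq]; omega
    have hdrop := List.drop_eq_getElem_cons hL
    have hmem : text.toList[text.toList.length - (j + 1)] ∈ pvLetters := by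
      apply hall; rw [hdrop]; exact List.mem_cons_self
    have hs := pvFindPos_isSome_of_mem pvLetters _ hmem 0
    cases hf : pvFindPos 0 pvLetters (text.toList[text.toList.length - (j + 1)]) with
    | none => rw [hf] at hs; exact absurd hs (by simp)
    | some n =>
      rw [hdrop, pvSumLoop_cons, pvPosDict_get?, hf]
      simp only [Option.map_some]
      rw [to_numbers_step _ _ _ _ _ h1 h2 hf]
      have heq : text.toList.length - (j + 1) + 1 = text.toList.length - j := by omega
      rw [heq]
      by_cases hj1 : 1 ≤ j
      · have hcast : -(↑(j + 1) : Int) + 1 = -(↑j : Int) := by push_cast; ring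
        rw [hcast, show value + (n + 1) = value + n + 1 from by ring]
        apply ih (value + n + 1) hj1 (by omega)
        intro c hc
        rw [← heq] at hc
        apply hall
        rw [hdrop]
        exact List.mem_cons_of_mem _ hc
      · have hj : j = 0 := by omega
        subst hj
        refine ⟨value + (n + 1), ?_, ?_⟩
        · rw [List.drop_of_length_le (by omega)]; rfl
        · norm_num
          rw [show value + (n + 1) = value + n + 1 from by ring]

lemma all_letters_iff (cs : List Char) :
    (cs.all pvLetters.contains = true) ↔ ∀ c ∈ cs, c ∈ pvLetters := by
  simp [List.all_eq_true]

lemma clamp_neg (L : Nat) (k : Nat) (h0 : 0 < k) :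
    PySem.List.clampIdx L (-(k : Int)) = L - k :=
  PySem.List.clampIdx_neg_natCast L k h0

-- ===== VERDICT (by name: the statement is the Claim_ definition above) =====
theorem to_numbers_spec : Claim_unchanged_to_numbers := by
  intro text index value _ hpre
  unfold Spec_to_numbers
  intro hnd
  unfold Pre_to_numbers at hpre
  unfold to_numbers_alt
  by_cases h0 : 0 ≤ index
  · rw [PySem.List.slice_from _ h0]
    exact to_numbers_nonneg_eq text (text.toList.length - index.toNat) index value h0 rfl
  · push_neg at h0
    obtain ⟨k, hk1, hkL, hke⟩ : ∃ k : Nat, 1 ≤ k ∧ k ≤ text.toList.length ∧ index = -(k : Int) :=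
      ⟨(-index).toNat, by omega, by omega, by omega⟩
    subst hke
    unfold D_to_numbers at hnd
    have hne : ¬ ((text.toList.drop (text.toList.length - (-(-(k : Int))).toNat)).all
        pvLetters.contains = true) := fun hc => hnd ⟨by omega, by omega, hc⟩
    rw [all_letters_iff] at hne
    push_neg at hne
    rcases hne with ⟨c, hc, hcl⟩
    have hidx : (-(-(k : Int))).toNat = k := by omega
    rw [hidx] at hc
    rw [PySem.List.slice_some_none, clamp_neg _ _ (by omega)]
    rw [pvSumLoop_none_of_nonletter _ _ ⟨c, hc, hcl⟩]
    exact to_numbers_neg_none text k value hk1 hkL ⟨c, hc, hcl⟩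

set_option maxRecDepth 100000 in
theorem to_numbers_changed : Claim_changed_to_numbers := by
  unfold Claim_changed_to_numbers
  refine ⟨by decide, by decide, by decide, ?_, ?_, by decide⟩
  · show to_numbers "ab" (-1) 0 = some 5
    rw [to_numbers_step _ _ _ 'b' 1 (by decide) (by decide) (by decide)]
    norm_num
    rw [to_numbers_step _ _ _ 'a' 0 (by decide) (by decide) (by decide)]
    norm_num
    rw [to_numbers_step _ _ _ 'b' 1 (by decide) (by decide) (by decide)]
    norm_num
    rw [to_numbers_base _ _ _ (by decide)]
  · show to_numbers_alt "ab" (-1) 0 = some 2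
    unfold to_numbers_alt
    rw [show PySem.List.slice "ab".toList (some (-1)) none = ['b'] from by decide]
    rw [pvSumLoop_cons, pvPosDict_get?,
      show pvFindPos 0 pvLetters 'b' = some 1 from by decide]
    simp only [Option.map_some]
    show some (0 + (1 + 1)) = some 2
    norm_num

theorem to_numbers_tight : Claim_exact_to_numbers := by
  intro text index value _ hpre hd
  unfold Pre_to_numbers at hpre
  unfold D_to_numbers at hd
  rcases hd with ⟨hneg, _, hall⟩
  obtain ⟨k, hk1, hkL, hke⟩ : ∃ k : Nat, 1 ≤ k ∧ k ≤ text.toList.length ∧ index = -(k : Int) :=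
    ⟨(-index).toNat, by omega, by omega, by omega⟩
  subst hke
  rw [all_letters_iff] at hall
  have hidx : (-(-(k : Int))).toNat = k := by omega
  rw [hidx] at hall
  obtain ⟨v', hB, hA⟩ := to_numbers_neg_allLetters text k value hk1 hkL hall
  unfold to_numbers_alt
  rw [PySem.List.slice_some_none, clamp_neg _ _ (by omega), hB, hA]
  rw [to_numbers_nonneg_eq text text.toList.length 0 v' (by omega) (by simp)]
  simp only [Int.toNat_zero, List.drop_zero]
  intro hcontra
  cases hS : pvSumLoop pvPosDict v' text.toList with
  | none => rw [hS] at hcontra; exact absurd hcontra (by simp)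
  | some s =>
    rw [hS] at hcontra
    have hbound := pvSumLoop_some_bound text.toList v' s hS
    have : s = v' := by exact Option.some_inj.mp hcontra
    omega
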